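-- pv_equiv track=rewrite | github.com/PaulusKlaus/ELSYS-Prosjekt | StyreenhetGUI.py | get_lowest_hastegrad_requests
-- ===== SOURCE A (Python) =====
-- def get_lowest_hastegrad_requests(requests):
--     lowest_hastegrad_requests = []
--     room_hastegrad_map = {}
--     for request in requests:
--         room = request.get('Rom')
--         hastegrad = request.get('Hastegrad')
--         if room not in room_hastegrad_map:
--             room_hastegrad_map[room] = hastegrad
--         else:
--             if hastegrad < room_hastegrad_map[room]:
--                 room_hastegrad_map[room] = hastegrad
--     for request in requests:
--         room = request.get('Rom')
--         hastegrad = request.get('Hastegrad')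
--         if hastegrad == room_hastegrad_map[room]:
--             lowest_hastegrad_requests.append(request)
--
--     return lowest_hastegrad_requests
-- ===== SOURCE B (Python) =====
-- def get_lowest_hastegrad_requests(requests):
--     best = {}
--     for i, request in enumerate(requests):
--         room = request.get('Rom')
--         hastegrad = request.get('Hastegrad')
--         if room not in best:
--             best[room] = (hastegrad, [(i, request)])
--         else:
--             m, kept = best[room]
--             if hastegrad < m:
--                 best[room] = (hastegrad, [(i, request)])
--             elif hastegrad == m:
--                 kept.append((i, request))
--     merged = [pair for _, kept in best.values() for pair in kept]
--     merged.sort(key=lambda pair: pair[0])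
--     return [request for _, request in merged]
-- ===== Notes on version B (the rewrite author's own statement) =====
-- stated objective: alternative
-- what changed: B makes a single pass over requests, keeping per room the running minimum together with the list of (index, request) pairs that achieve it (cleared when a strictly smaller value arrives), then merges the per-room kept lists and restores original order by sorting on index, instead of A's two passes (min map, then filter).
import Mathlib
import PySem

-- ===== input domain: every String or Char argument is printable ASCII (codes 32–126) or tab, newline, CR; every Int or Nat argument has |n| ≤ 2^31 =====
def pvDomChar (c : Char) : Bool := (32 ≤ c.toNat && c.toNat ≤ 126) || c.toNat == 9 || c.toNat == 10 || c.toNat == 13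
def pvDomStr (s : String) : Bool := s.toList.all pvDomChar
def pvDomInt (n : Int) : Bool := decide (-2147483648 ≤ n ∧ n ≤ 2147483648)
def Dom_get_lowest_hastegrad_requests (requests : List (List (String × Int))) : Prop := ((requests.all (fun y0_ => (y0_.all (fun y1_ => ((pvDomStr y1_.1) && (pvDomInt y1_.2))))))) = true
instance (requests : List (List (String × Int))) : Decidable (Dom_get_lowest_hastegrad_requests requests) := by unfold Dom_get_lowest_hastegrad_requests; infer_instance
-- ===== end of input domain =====

-- B replaces A's two passes (build a per-room minimum map, then re-scan requests filtering on it)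
-- by a SINGLE pass that keeps, per room, the running minimum together with the (index, request)
-- pairs achieving it (cleared when a strictly smaller value arrives), then merges the per-room
-- kept lists and restores the original order by sorting on the index (objective: alternative).

-- ===== PORT A =====
-- request.get('Rom') / request.get('Hastegrad'): value or None
def pvRoomOf (r : List (String × Int)) : Option Int := (PySem.Dict.ofList r).get? "Rom"
def pvHastOf (r : List (String × Int)) : Option Int := (PySem.Dict.ofList r).get? "Hastegrad"
-- Python '<' on the two .get results; it RAISES TypeError when a side is None — those inputs are
-- excluded by Pre_, where the comparison never sees a None; 'false' (keep stored value) is the total stub.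
def pvLt (a b : Option Int) : Bool :=
  match a, b with
  | some x, some y => decide (x < y)
  | _, _ => false

def get_lowest_hastegrad_requests (requests : List (List (String × Int))) : List (List (String × Int)) :=
  let room_hastegrad_map :=
    requests.foldl (fun d request =>
      let room := pvRoomOf request
      let hastegrad := pvHastOf request
      if !(d.contains room) then d.insert room hastegrad
      else if pvLt hastegrad (d.getD room none) then d.insert room hastegrad
      else d)
      PySem.Dict.empty
  -- room_hastegrad_map[room]: room is always a key here (same requests as the first loop), so getD's
  -- default is never used
  requests.foldl (fun acc request =>
    let room := pvRoomOf request
    let hastegrad := pvHastOf request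
    if hastegrad == room_hastegrad_map.getD room none then acc ++ [request] else acc) []

-- ===== PORT B =====
-- single pass over enumerate(requests): per room the running min and the (index, request) pairs
-- achieving it; Python's in-place kept.append is ported as re-inserting the appended list
def get_lowest_hastegrad_requests_alt (requests : List (List (String × Int))) : List (List (String × Int)) :=
  let best :=
    (PySem.List.enumerate requests).foldl (fun d q =>
      let room := pvRoomOf q.2
      let hastegrad := pvHastOf q.2
      if !(d.contains room) then d.insert room (hastegrad, [(q.1, q.2)])
      else
        let mk := d.getD room (none, [])
        if pvLt hastegrad mk.1 then d.insert room (hastegrad, [(q.1, q.2)])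
        else if hastegrad == mk.1 then d.insert room (mk.1, mk.2 ++ [(q.1, q.2)])
        else d)
      PySem.Dict.empty
  -- merged = [pair for _, kept in best.values() for pair in kept]
  let merged := best.values.foldl (fun acc kv => acc ++ kv.2) []
  -- merged.sort(key=lambda pair: pair[0])
  let sortedMerged := PySem.List.sorted merged (fun pair => pair.1) false
  sortedMerged.map (fun pair => pair.2)

-- ===== PRECONDITION & SPEC =====
-- Pre_ excludes exactly the inputs on which Python A raises TypeError: a request without a
-- 'Hastegrad' value whose room occurs more than once makes A (and B) compare None with '<'.
def Pre_get_lowest_hastegrad_requests (requests : List (List (String × Int))) : Prop :=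
  ∀ r ∈ requests, pvHastOf r = none →
    (requests.filter (fun r' => pvRoomOf r' == pvRoomOf r)).length ≤ 1
instance (requests : List (List (String × Int))) : Decidable (Pre_get_lowest_hastegrad_requests requests) := by unfold Pre_get_lowest_hastegrad_requests; infer_instance
def pvWitness_get_lowest_hastegrad_requests : (List (List (String × Int))) :=
  [[("Rom", 1), ("Hastegrad", 2)], [("Rom", 1), ("Hastegrad", 1)], [("Rom", 2), ("Hastegrad", 5)]]

def Spec_get_lowest_hastegrad_requests (requests : List (List (String × Int))) (out : List (List (String × Int))) : Prop := out = get_lowest_hastegrad_requests_alt requests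
instance (requests : List (List (String × Int))) (out : List (List (String × Int))) : Decidable (Spec_get_lowest_hastegrad_requests requests out) := by unfold Spec_get_lowest_hastegrad_requests; infer_instance

-- ===== CLAIM (what is proved, stated in full; the proofs are below) =====
def Claim_equal_get_lowest_hastegrad_requests : Prop := ∀ (requests : List (List (String × Int))), Dom_get_lowest_hastegrad_requests requests → Pre_get_lowest_hastegrad_requests requests → Spec_get_lowest_hastegrad_requests requests (get_lowest_hastegrad_requests requests)

-- ===== LEMMAS AND PROOFS =====

-- the per-room list of hastegrad values, in request order
def pvHgs (requests : List (List (String × Int))) (k : Option Int) : List (Option Int) :=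
  (requests.filter (fun r' => pvRoomOf r' == k)).map pvHastOf

-- min over a nonempty list with Python's '<' (the value A's map holds at an occurring key)
def pvMin (vals : List (Option Int)) : Option Int :=
  match vals with
  | [] => none
  | h :: t => t.foldl (fun m b => if pvLt b m then b else m) h

-- the per-room enumerated occurrences, in request order
def pvEF (requests : List (List (String × Int))) (s : Int) (k : Option Int) :
    List (Int × List (String × Int)) :=
  (PySem.List.enumerate requests s).filter (fun q => pvRoomOf q.2 == k)

-- B's per-key state transition, extracted as a function on the optional (min, kept) value
def pvStepVal (acc : Option (Option Int × List (Int × List (String × Int))))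
    (q : Int × List (String × Int)) : Option (Option Int × List (Int × List (String × Int))) :=
  match acc with
  | none => some (pvHastOf q.2, [q])
  | some mk =>
    if pvLt (pvHastOf q.2) mk.1 then some (pvHastOf q.2, [q])
    else if pvHastOf q.2 == mk.1 then some (mk.1, mk.2 ++ [q])
    else some mk

-- folding A's "keep the smaller" update over an Option accumulator is min over the collected list
lemma pvFoldl_combine_some (t : List (Option Int)) (m : Option Int) :
    t.foldl (fun acc h => some (match acc with | none => h | some m => if pvLt h m then h else m)) (some m)
      = some (t.foldl (fun m b => if pvLt b m then b else m) m) := by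
  induction t generalizing m with
  | nil => rfl
  | cons h t ih => simp only [List.foldl_cons]; exact ih _

-- characterisation of A's first loop: the map's entry at k folds the hastegrads of k's requests
lemma pvAmap_get (requests : List (List (String × Int)))
    (d : PySem.Dict (Option Int) (Option Int)) (k : Option Int) :
    (requests.foldl (fun d request =>
        let room := pvRoomOf request
        let hastegrad := pvHastOf request
        if !(d.contains room) then d.insert room hastegrad
        else if pvLt hastegrad (d.getD room none) then d.insert room hastegrad
        else d) d).get? k
      = (pvHgs requests k).foldl
          (fun acc h => some (match acc with | none => h | some m => if pvLt h m then h else m))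
          (d.get? k) := by
  induction requests generalizing d with
  | nil => rfl
  | cons r rs ih =>
    simp only [List.foldl_cons, pvHgs, List.filter_cons]
    by_cases hk : pvRoomOf r = k
    · subst hk
      simp only [BEq.rfl, if_pos, List.map_cons, List.foldl_cons]
      rw [ih]
      simp only [pvHgs]
      congr 1
      by_cases hc : d.contains (pvRoomOf r) = true
      · obtain ⟨m, hm⟩ : ∃ m, d.get? (pvRoomOf r) = some m := by
          have := PySem.Dict.contains_eq_isSome_get? d (pvRoomOf r)
          rw [hc] at this
          exact Option.isSome_iff_exists.mp this.symm
        rw [PySem.Dict.getD_of_get?_eq_some d none hm, hc, hm]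
        by_cases hlt : pvLt (pvHastOf r) m = true
        · simp only [hlt, Bool.not_true, Bool.false_eq_true, if_false, if_true,
            PySem.Dict.get?_insert_self]
        · simp only [Bool.not_eq_true] at hlt
          simp only [hlt, Bool.not_true, Bool.false_eq_true, if_false, hm]
      · simp only [Bool.not_eq_true] at hc
        have h0 : d.get? (pvRoomOf r) = none :=
          (PySem.Dict.get?_eq_none_iff_contains d (pvRoomOf r)).mpr hc
        simp only [hc, Bool.not_false, if_true, h0, PySem.Dict.get?_insert_self]
    · have hbeq : (pvRoomOf r == k) = false := by
        simp only [beq_eq_false_iff_ne, ne_eq]; exact hk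
      simp only [hbeq, Bool.false_eq_true, if_false]
      rw [ih]
      simp only [pvHgs]
      congr 1
      by_cases hc : d.contains (pvRoomOf r) = true <;>
        by_cases hlt : pvLt (pvHastOf r) (d.getD (pvRoomOf r) none) = true <;>
        simp [hc, hlt, PySem.Dict.get?_insert_of_ne d _ (Ne.symm hk)]

-- characterisation of B's loop: the state at key k folds pvStepVal over k's enumerated occurrences
lemma pvBmap_get (requests : List (List (String × Int))) (s : Int)
    (d : PySem.Dict (Option Int) (Option Int × List (Int × List (String × Int)))) (k : Option Int) :
    ((PySem.List.enumerate requests s).foldl (fun d q =>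
        let room := pvRoomOf q.2
        let hastegrad := pvHastOf q.2
        if !(d.contains room) then d.insert room (hastegrad, [(q.1, q.2)])
        else
          let mk := d.getD room (none, [])
          if pvLt hastegrad mk.1 then d.insert room (hastegrad, [(q.1, q.2)])
          else if hastegrad == mk.1 then d.insert room (mk.1, mk.2 ++ [(q.1, q.2)])
          else d) d).get? k
      = (pvEF requests s k).foldl pvStepVal (d.get? k) := by
  induction requests generalizing s d with
  | nil => rfl
  | cons r rs ih =>
    rw [PySem.List.enumerate_cons]
    simp only [List.foldl_cons, pvEF, PySem.List.enumerate_cons, List.filter_cons]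
    by_cases hk : pvRoomOf r = k
    · subst hk
      simp only [BEq.rfl, if_pos, List.foldl_cons]
      rw [show ((PySem.List.enumerate rs (s + 1)).filter (fun q => pvRoomOf q.2 == pvRoomOf r))
            = pvEF rs (s + 1) (pvRoomOf r) from rfl] at *
      rw [ih]
      congr 1
      by_cases hc : d.contains (pvRoomOf r) = true
      · obtain ⟨mk, hm⟩ : ∃ mk, d.get? (pvRoomOf r) = some mk := by
          have := PySem.Dict.contains_eq_isSome_get? d (pvRoomOf r)
          rw [hc] at this
          exact Option.isSome_iff_exists.mp this.symm
        rw [PySem.Dict.getD_of_get?_eq_some d (none, []) hm, hc, hm]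
        simp only [pvStepVal]
        by_cases hlt : pvLt (pvHastOf r) mk.1 = true
        · simp only [hlt, Bool.not_true, Bool.false_eq_true, if_false, if_true,
            PySem.Dict.get?_insert_self]
        · simp only [Bool.not_eq_true] at hlt
          by_cases heq : (pvHastOf r == mk.1) = true
          · simp only [hlt, heq, Bool.not_true, Bool.false_eq_true, if_false, if_true,
              PySem.Dict.get?_insert_self]
          · simp only [Bool.not_eq_true] at heq
            simp only [hlt, heq, Bool.not_true, Bool.false_eq_true, if_false, hm]
      · simp only [Bool.not_eq_true] at hc
        have h0 : d.get? (pvRoomOf r) = none :=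
          (PySem.Dict.get?_eq_none_iff_contains d (pvRoomOf r)).mpr hc
        simp only [hc, Bool.not_false, if_true, h0, PySem.Dict.get?_insert_self, pvStepVal]
    · have hbeq : (pvRoomOf r == k) = false := by
        simp only [beq_eq_false_iff_ne, ne_eq]; exact hk
      simp only [hbeq, Bool.false_eq_true, if_false]
      rw [show ((PySem.List.enumerate rs (s + 1)).filter (fun q => pvRoomOf q.2 == k))
            = pvEF rs (s + 1) k from rfl]
      rw [ih]
      congr 1
      by_cases hc : d.contains (pvRoomOf r) = true <;>
        by_cases hlt : pvLt (pvHastOf r) (d.getD (pvRoomOf r) (none, [])).1 = true <;>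
        by_cases heq : (pvHastOf r == (d.getD (pvRoomOf r) (none, [])).1) = true <;>
        simp [hc, hlt, heq, PySem.Dict.get?_insert_of_ne d _ (Ne.symm hk)]

-- B's loop keeps the key list duplicate-free
lemma pvBmap_nodup (requests : List (List (String × Int))) (s : Int)
    (d : PySem.Dict (Option Int) (Option Int × List (Int × List (String × Int))))
    (hd : d.keys.Nodup) :
    ((PySem.List.enumerate requests s).foldl (fun d q =>
        let room := pvRoomOf q.2
        let hastegrad := pvHastOf q.2
        if !(d.contains room) then d.insert room (hastegrad, [(q.1, q.2)])
        else
          let mk := d.getD room (none, [])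
          if pvLt hastegrad mk.1 then d.insert room (hastegrad, [(q.1, q.2)])
          else if hastegrad == mk.1 then d.insert room (mk.1, mk.2 ++ [(q.1, q.2)])
          else d) d).keys.Nodup := by
  induction requests generalizing s d with
  | nil => exact hd
  | cons r rs ih =>
    rw [PySem.List.enumerate_cons]
    simp only [List.foldl_cons]
    apply ih
    dsimp only
    split_ifs <;>
      first
        | exact PySem.Dict.nodup_keys_insert _ _ _ hd
        | exact hd

-- pvStepVal never forgets a some-state, and produces some on a nonempty fold from none
lemma pvStepVal_foldl_some (ps : List (Int × List (String × Int)))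
    (x : Option Int × List (Int × List (String × Int))) :
    (ps.foldl pvStepVal (some x)).isSome := by
  induction ps generalizing x with
  | nil => rfl
  | cons q t ih =>
    simp only [List.foldl_cons, pvStepVal]
    split_ifs <;> exact ih _

-- the min-fold starting at a value never exceeds it (all values integers)
lemma pvMinFold_le (hs : List (Option Int)) (mv : Int)
    (hall : ∀ h ∈ hs, ∃ v, h = some v) :
    ∃ Mv : Int, hs.foldl (fun m b => if pvLt b m then b else m) (some mv) = some Mv ∧ Mv ≤ mv := by
  induction hs generalizing mv with
  | nil => exact ⟨mv, rfl, le_refl mv⟩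
  | cons h t ih =>
    obtain ⟨v, hv⟩ := hall h (List.mem_cons_self ..)
    subst hv
    simp only [List.foldl_cons, pvLt]
    by_cases hlt : v < mv
    · obtain ⟨Mv, hM, hle⟩ := ih v (fun h hm => hall h (List.mem_cons_of_mem _ hm))
      exact ⟨Mv, by simpa [hlt] using hM, by omega⟩
    · obtain ⟨Mv, hM, hle⟩ := ih mv (fun h hm => hall h (List.mem_cons_of_mem _ hm))
      exact ⟨Mv, by simpa [hlt] using hM, hle⟩

-- the value fold from an integer state: min of all values, keeping exactly the pairs achieving it
lemma pvStepVal_foldl_char (ps : List (Int × List (String × Int))) (mv : Int)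
    (kept : List (Int × List (String × Int)))
    (hall : ∀ q ∈ ps, ∃ v, pvHastOf q.2 = some v) :
    ps.foldl pvStepVal (some (some mv, kept))
      = some (ps.foldl (fun m q => if pvLt (pvHastOf q.2) m then pvHastOf q.2 else m) (some mv),
          (if (ps.foldl (fun m q => if pvLt (pvHastOf q.2) m then pvHastOf q.2 else m) (some mv)) == some mv then kept else [])
            ++ ps.filter (fun q => pvHastOf q.2 ==
                ps.foldl (fun m q => if pvLt (pvHastOf q.2) m then pvHastOf q.2 else m) (some mv))) := by
  induction ps generalizing mv kept with
  | nil => simp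
  | cons q t ih =>
    obtain ⟨v, hv⟩ := hall q (List.mem_cons_self ..)
    have hallt : ∀ p ∈ t, ∃ w, pvHastOf p.2 = some w :=
      fun p hp => hall p (List.mem_cons_of_mem _ hp)
    have halls : ∀ h ∈ t.map (fun q => pvHastOf q.2), ∃ w, h = some w := by
      intro h hh
      obtain ⟨p, hp, rfl⟩ := List.mem_map.mp hh
      exact hallt p hp
    have hFmap : ∀ m0 : Option Int,
        t.foldl (fun m q => if pvLt (pvHastOf q.2) m then pvHastOf q.2 else m) m0
          = (t.map (fun q => pvHastOf q.2)).foldl (fun m b => if pvLt b m then b else m) m0 := by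
      intro m0; rw [List.foldl_map]
    simp only [List.foldl_cons, pvStepVal, hv]
    by_cases hlt : pvLt (some v) (some mv) = true
    · have hvm : v < mv := by simpa [pvLt] using hlt
      simp only [hlt, if_true]
      rw [ih v [q] hallt]
      obtain ⟨Mv, hM, hle⟩ := pvMinFold_le (t.map (fun q => pvHastOf q.2)) v halls
      rw [← hFmap] at hM
      rw [hM]
      have h1 : (some Mv == some mv) = false := by
        simp only [beq_eq_false_iff_ne, ne_eq, Option.some.injEq]; omega
      simp only [h1, Bool.false_eq_true, if_false, List.nil_append, List.filter_cons, hv]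
      by_cases hveq : v = Mv
      · subst hveq
        simp
      · have h2 : (some v == some Mv) = false := by
          simp only [beq_eq_false_iff_ne, ne_eq, Option.some.injEq]; exact hveq
        have h3 : (some Mv == some v) = false := by
          simp only [beq_eq_false_iff_ne, ne_eq, Option.some.injEq]
          exact fun h => hveq h.symm
        simp [h2, h3]
    · simp only [Bool.not_eq_true] at hlt
      have hvm : ¬ v < mv := by simpa [pvLt] using hlt
      simp only [hlt, Bool.false_eq_true, if_false]
      by_cases heq : v = mv
      · subst heq
        simp only [BEq.rfl, if_true]
        rw [ih v (kept ++ [q]) hallt]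
        obtain ⟨Mv, hM, hle⟩ := pvMinFold_le (t.map (fun q => pvHastOf q.2)) v halls
        rw [← hFmap] at hM
        rw [hM]
        by_cases hMm : Mv = v
        · subst hMm
          simp [hv, List.append_assoc]
        · have h1 : (some Mv == some v) = false := by
            simp only [beq_eq_false_iff_ne, ne_eq, Option.some.injEq]; exact hMm
          have h2 : (some v == some Mv) = false := by
            simp only [beq_eq_false_iff_ne, ne_eq, Option.some.injEq]
            exact fun h => hMm h.symm
          simp [h1, h2, hv]
      · have hbeq : (some v == some mv) = false := by
          simp only [beq_eq_false_iff_ne, ne_eq, Option.some.injEq]; exact heq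
        simp only [hbeq, Bool.false_eq_true, if_false]
        rw [ih mv kept hallt]
        obtain ⟨Mv, hM, hle⟩ := pvMinFold_le (t.map (fun q => pvHastOf q.2)) mv halls
        rw [← hFmap] at hM
        rw [hM]
        have hgt : mv < v := by omega
        have h1 : (some v == some Mv) = false := by
          simp only [beq_eq_false_iff_ne, ne_eq, Option.some.injEq]; omega
        simp [h1, hv]

-- map snd of an enumerate-filter on the snd is the plain filter
lemma pvEnum_filter_map_snd (l : List (List (String × Int))) (s : Int)
    (p : List (String × Int) → Bool) :
    (((PySem.List.enumerate l s).filter (fun q => p q.2)).map (fun q => q.2)) = l.filter p := by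
  induction l generalizing s with
  | nil => rfl
  | cons x t ih =>
    rw [PySem.List.enumerate_cons]
    simp only [List.filter_cons]
    by_cases hp : p x = true
    · simp only [hp, if_pos, List.map_cons, ih]
    · simp only [hp, Bool.false_eq_true, if_false, ih]

-- under Pre_, the fold over a key's occurrences yields the min and exactly the pairs achieving it
lemma pvBkey_char (requests : List (List (String × Int)))
    (hPre : Pre_get_lowest_hastegrad_requests requests) (k : Option Int)
    (hne : pvEF requests 0 k ≠ []) :
    (pvEF requests 0 k).foldl pvStepVal none
      = some (pvMin (pvHgs requests k),
          (pvEF requests 0 k).filter (fun q => pvHastOf q.2 == pvMin (pvHgs requests k))) := by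
  obtain ⟨q, qs, hqs⟩ : ∃ q qs, pvEF requests 0 k = q :: qs := by
    cases h : pvEF requests 0 k with
    | nil => exact absurd h hne
    | cons q qs => exact ⟨q, qs, rfl⟩
  have hq_ef : q ∈ (PySem.List.enumerate requests 0).filter (fun p => pvRoomOf p.2 == k) := by
    show q ∈ pvEF requests 0 k
    rw [hqs]; exact List.mem_cons_self ..
  have hq_room : pvRoomOf q.2 = k := beq_iff_eq.mp (List.mem_filter.mp hq_ef).2
  have hq_req : q.2 ∈ requests := by
    have := List.mem_map_of_mem (f := fun p : Int × List (String × Int) => p.2)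
      (List.mem_filter.mp hq_ef).1
    rwa [PySem.List.map_snd_enumerate] at this
  have hmap : pvHgs requests k = (pvEF requests 0 k).map (fun q => pvHastOf q.2) := by
    unfold pvHgs pvEF
    rw [← pvEnum_filter_map_snd requests 0 (fun r' => pvRoomOf r' == k), List.map_map]
    rfl
  have hlen : (requests.filter (fun r' => pvRoomOf r' == k)).length
      = (pvEF requests 0 k).length := by
    rw [← pvEnum_filter_map_snd requests 0 (fun r' => pvRoomOf r' == k), List.length_map]
    rfl
  cases hv : pvHastOf q.2 with
  | none =>
    have hle := hPre q.2 hq_req hv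
    rw [hq_room] at hle
    rw [hqs] at hlen
    have hqs0 : qs = [] := by
      rw [hlen] at hle
      simp only [List.length_cons] at hle
      exact List.eq_nil_of_length_eq_zero (by omega)
    rw [hqs, hqs0, hmap, hqs, hqs0]
    simp [pvMin, pvStepVal]
  | some v =>
    have hallqs : ∀ p ∈ qs, ∃ w, pvHastOf p.2 = some w := by
      intro p hp
      cases hw : pvHastOf p.2 with
      | some w => exact ⟨w, rfl⟩
      | none =>
        exfalso
        have hp_ef : p ∈ (PySem.List.enumerate requests 0).filter (fun p => pvRoomOf p.2 == k) := by
          show p ∈ pvEF requests 0 k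
          rw [hqs]; exact List.mem_cons_of_mem _ hp
        have hp_room : pvRoomOf p.2 = k := beq_iff_eq.mp (List.mem_filter.mp hp_ef).2
        have hp_req : p.2 ∈ requests := by
          have := List.mem_map_of_mem (f := fun p : Int × List (String × Int) => p.2)
            (List.mem_filter.mp hp_ef).1
          rwa [PySem.List.map_snd_enumerate] at this
        have hle := hPre p.2 hp_req hw
        rw [hp_room] at hle
        rw [hqs] at hlen
        rw [hlen] at hle
        have : qs ≠ [] := List.ne_nil_of_mem hp
        have : 1 ≤ qs.length := List.length_pos_of_ne_nil this
        simp only [List.length_cons] at hle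
        omega
    have hpm : pvMin (pvHgs requests k)
        = qs.foldl (fun m p => if pvLt (pvHastOf p.2) m then pvHastOf p.2 else m) (some v) := by
      rw [hmap, hqs]
      simp only [List.map_cons, pvMin, hv]
      rw [List.foldl_map]
    rw [hqs]
    simp only [List.foldl_cons]
    rw [show pvStepVal none q = some (pvHastOf q.2, [q]) from rfl, hv]
    rw [pvStepVal_foldl_char qs v [q] hallqs]
    rw [hpm]
    set Fq := qs.foldl (fun m p => if pvLt (pvHastOf p.2) m then pvHastOf p.2 else m) (some v) with hFq
    by_cases hE : Fq = some v
    · simp [hE, hv]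
    · have h1 : (Fq == some v) = false := by
        simp only [beq_eq_false_iff_ne, ne_eq]; exact hE
      have h2 : (some v == Fq) = false := by
        simp only [beq_eq_false_iff_ne, ne_eq]
        exact fun h => hE h.symm
      simp [h1, h2, hv]

-- distinct keys covering all elements: concatenating the per-key filters is a permutation
lemma pvFlatMap_filter_perm (ks : List (Option Int)) (l : List (Int × List (String × Int)))
    (hnd : ks.Nodup) (hcov : ∀ x ∈ l, pvRoomOf x.2 ∈ ks) :
    (ks.flatMap (fun k => l.filter (fun x => pvRoomOf x.2 == k))).Perm l := by
  induction ks generalizing l with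
  | nil =>
    cases l with
    | nil => simp
    | cons x t => exact absurd (hcov x (List.mem_cons_self ..)) (List.not_mem_nil)
  | cons k ks ih =>
    simp only [List.flatMap_cons]
    have hstep : ∀ k' ∈ ks, l.filter (fun x => pvRoomOf x.2 == k')
        = (l.filter (fun x => !(pvRoomOf x.2 == k))).filter (fun x => pvRoomOf x.2 == k') := by
      intro k' hk'
      rw [List.filter_filter]
      apply List.filter_congr
      intro x _
      by_cases hr : pvRoomOf x.2 = k'
      · have hkk : ¬ k' = k := fun h => (List.nodup_cons.mp hnd).1 (h ▸ hk')
        simp [hr, hkk]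
      · have hbeq : (pvRoomOf x.2 == k') = false := by
          simp only [beq_eq_false_iff_ne, ne_eq]; exact hr
        simp [hbeq]
    have hflat : ks.flatMap (fun k' => l.filter (fun x => pvRoomOf x.2 == k'))
        = ks.flatMap (fun k' =>
            (l.filter (fun x => !(pvRoomOf x.2 == k))).filter (fun x => pvRoomOf x.2 == k')) := by
      rw [List.flatMap_def, List.flatMap_def, List.map_congr_left hstep]
    rw [hflat]
    have hcov' : ∀ x ∈ l.filter (fun x => !(pvRoomOf x.2 == k)), pvRoomOf x.2 ∈ ks := by
      intro x hx
      have hx_l := List.mem_of_mem_filter hx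
      have hx_ne := List.of_mem_filter hx
      simp only [Bool.not_eq_eq_eq_not, Bool.not_true, beq_eq_false_iff_ne, ne_eq] at hx_ne
      have := hcov x hx_l
      cases List.mem_cons.mp this with
      | inl h => exact absurd h hx_ne
      | inr h => exact h
    have hperm := ih (l.filter (fun x => !(pvRoomOf x.2 == k))) (List.nodup_cons.mp hnd).2 hcov'
    exact (hperm.append_left _).trans (List.filter_append_perm _ l)

-- A's result is the order-preserving filter on "hastegrad equals the per-room minimum"
lemma pvA_eq (requests : List (List (String × Int)))
    (_hPre : Pre_get_lowest_hastegrad_requests requests) :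
    get_lowest_hastegrad_requests requests
      = requests.filter (fun r => pvHastOf r == pvMin (pvHgs requests (pvRoomOf r))) := by
  unfold get_lowest_hastegrad_requests
  rw [PySem.List.foldl_append_if
      (fun request => pvHastOf request ==
        (requests.foldl (fun d request =>
            let room := pvRoomOf request
            let hastegrad := pvHastOf request
            if !(d.contains room) then d.insert room hastegrad
            else if pvLt hastegrad (d.getD room none) then d.insert room hastegrad
            else d) PySem.Dict.empty).getD (pvRoomOf request) none)
      (fun request => request) requests []]
  rw [List.nil_append, List.map_id_fun', id]
  apply List.filter_congr
  intro r hr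
  obtain ⟨h, t, hht⟩ : ∃ h t, pvHgs requests (pvRoomOf r) = h :: t := by
    have : pvHastOf r ∈ pvHgs requests (pvRoomOf r) := by
      apply List.mem_map_of_mem
      exact List.mem_filter.mpr ⟨hr, by simp⟩
    cases hx : pvHgs requests (pvRoomOf r) with
    | nil => rw [hx] at this; exact absurd this (List.not_mem_nil)
    | cons h t => exact ⟨h, t, rfl⟩
  have hA : (requests.foldl (fun d request =>
        let room := pvRoomOf request
        let hastegrad := pvHastOf request
        if !(d.contains room) then d.insert room hastegrad
        else if pvLt hastegrad (d.getD room none) then d.insert room hastegrad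
        else d) PySem.Dict.empty).getD (pvRoomOf r) none
      = pvMin (pvHgs requests (pvRoomOf r)) := by
    rw [PySem.Dict.getD_eq_get?_getD, pvAmap_get requests PySem.Dict.empty (pvRoomOf r)]
    rw [PySem.Dict.get?_empty, hht, List.foldl_cons, pvFoldl_combine_some]
    rfl
  rw [hA]

-- B's result is the same filter: the kept lists hold exactly the minimal pairs, the merge is a
-- permutation of the enumerated filter, and sorting on the (strictly increasing) index restores it
lemma pvB_eq (requests : List (List (String × Int)))
    (hPre : Pre_get_lowest_hastegrad_requests requests) :
    get_lowest_hastegrad_requests_alt requests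
      = requests.filter (fun r => pvHastOf r == pvMin (pvHgs requests (pvRoomOf r))) := by
  unfold get_lowest_hastegrad_requests_alt
  set best := (PySem.List.enumerate requests).foldl (fun d q =>
      let room := pvRoomOf q.2
      let hastegrad := pvHastOf q.2
      if !(d.contains room) then d.insert room (hastegrad, [(q.1, q.2)])
      else
        let mk := d.getD room (none, [])
        if pvLt hastegrad mk.1 then d.insert room (hastegrad, [(q.1, q.2)])
        else if hastegrad == mk.1 then d.insert room (mk.1, mk.2 ++ [(q.1, q.2)])
        else d)
    PySem.Dict.empty with hbest
  set target := (PySem.List.enumerate requests (0 : Int)).filter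
      (fun q => pvHastOf q.2 == pvMin (pvHgs requests (pvRoomOf q.2))) with htarget
  have hnodup : best.keys.Nodup := by
    rw [hbest]
    exact pvBmap_nodup requests 0 PySem.Dict.empty PySem.Dict.nodup_keys_empty
  have hget : ∀ k, best.get? k = (pvEF requests 0 k).foldl pvStepVal none := by
    intro k
    rw [hbest, pvBmap_get requests 0 PySem.Dict.empty k, PySem.Dict.get?_empty]
  have hmem : ∀ k, k ∈ best.keys ↔ pvEF requests 0 k ≠ [] := by
    intro k
    constructor
    · intro hk hnil
      have hc := (PySem.Dict.contains_iff_mem_keys best k).mpr hk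
      rw [PySem.Dict.contains_eq_isSome_get?, hget k, hnil] at hc
      simp at hc
    · intro hne
      apply (PySem.Dict.contains_iff_mem_keys best k).mp
      rw [PySem.Dict.contains_eq_isSome_get?, hget k]
      obtain ⟨q, qs, hqs⟩ : ∃ q qs, pvEF requests 0 k = q :: qs := by
        cases h : pvEF requests 0 k with
        | nil => exact absurd h hne
        | cons q qs => exact ⟨q, qs, rfl⟩
      rw [hqs, List.foldl_cons, show pvStepVal none q = some (pvHastOf q.2, [q]) from rfl]
      exact pvStepVal_foldl_some qs _
  have hval : ∀ k ∈ best.keys, best.getD k (none, [])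
      = (pvMin (pvHgs requests k), target.filter (fun q => pvRoomOf q.2 == k)) := by
    intro k hk
    have hne : pvEF requests 0 k ≠ [] := (hmem k).mp hk
    have hchar := pvBkey_char requests hPre k hne
    have hgd := PySem.Dict.getD_of_get?_eq_some best (none, []) ((hget k).trans hchar)
    rw [hgd]
    congr 1
    rw [htarget]
    unfold pvEF
    rw [List.filter_filter, List.filter_filter]
    apply List.filter_congr
    intro q _
    by_cases hr : pvRoomOf q.2 = k
    · simp [hr]
    · have hbeq : (pvRoomOf q.2 == k) = false := by
        simp only [beq_eq_false_iff_ne, ne_eq]; exact hr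
      simp [hbeq]
  have hmerged : best.values.foldl (fun acc kv => acc ++ kv.2) []
      = best.keys.flatMap (fun k => target.filter (fun q => pvRoomOf q.2 == k)) := by
    rw [PySem.List.foldl_append_eq_flatMap (fun kv => kv.2) best.values [], List.nil_append]
    rw [PySem.Dict.values_eq_map_keys best hnodup (none, [])]
    rw [List.flatMap_def, List.flatMap_def, List.map_map]
    congr 1
    apply List.map_congr_left
    intro k hk
    simp only [Function.comp]
    rw [hval k hk]
  have hcov : ∀ x ∈ target, pvRoomOf x.2 ∈ best.keys := by
    intro x hx
    have hx_enum : x ∈ PySem.List.enumerate requests (0 : Int) := List.mem_of_mem_filter hx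
    have hx_ef : x ∈ pvEF requests 0 (pvRoomOf x.2) := by
      unfold pvEF
      exact List.mem_filter.mpr ⟨hx_enum, by simp⟩
    exact (hmem (pvRoomOf x.2)).mpr (List.ne_nil_of_mem hx_ef)
  have hperm : (best.keys.flatMap (fun k => target.filter (fun q => pvRoomOf q.2 == k))).Perm target :=
    pvFlatMap_filter_perm best.keys target hnodup hcov
  have hpair : target.Pairwise (fun a b => a.1 < b.1) :=
    (PySem.List.pairwise_lt_enumerate requests 0).sublist (List.filter_sublist)
  have hsorted : PySem.List.sorted (best.values.foldl (fun acc kv => acc ++ kv.2) [])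
      (fun pair => pair.1) false = target := by
    rw [hmerged]
    exact PySem.List.sorted_eq_of_perm_of_pairwise_lt _ target (fun pair => pair.1)
      hperm.symm hpair
  show (List.map (fun pair => pair.2)
      (PySem.List.sorted (List.foldl (fun acc kv => acc ++ kv.2) [] best.values)
        (fun pair => pair.1)))
    = List.filter (fun r => pvHastOf r == pvMin (pvHgs requests (pvRoomOf r))) requests
  rw [hsorted, htarget]
  exact pvEnum_filter_map_snd requests 0
    (fun r => pvHastOf r == pvMin (pvHgs requests (pvRoomOf r)))

-- ===== VERDICT (by name: the statement is the Claim_ definition above) =====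
theorem get_lowest_hastegrad_requests_spec : Claim_equal_get_lowest_hastegrad_requests := by
  intro requests _hDom hPre
  unfold Spec_get_lowest_hastegrad_requests
  rw [pvA_eq requests hPre, pvB_eq requests hPre]
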